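-- pv_equiv track=rewrite | github.com/weizhixiaoyi/leetcode | nowcoder/0808/01.py | solve
-- ===== SOURCE A (Python) =====
-- def solve(n, nums):
--     ans = 0
--     nums = sorted(nums)
--     for num in nums:
--         if num == 1:
--             continue
--         elif num == 2:
--             ans += 1
--         elif num == 3:
--             ans += 1
--         else:
--             if num % 2 == 0:
--                 ans += (num // 2)
--             else:
--                 ans += 1
--                 num -= 3
--                 ans += (num // 2)
--     return ans
-- ===== SOURCE B (Python) =====
-- def solve(n, nums):
--     # Each element's contribution collapses to num // 2; no sort, no casing.
--     return sum(num // 2 for num in nums)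
-- ===== Notes on version B (the rewrite author's own statement) =====
-- stated objective: simpler
-- what changed: Replaced the sort plus five-way case ladder with the single closed-form sum of num//2 over the list (each branch of A reduces to floor division by 2, and the sort is irrelevant to a sum).
import Mathlib
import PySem

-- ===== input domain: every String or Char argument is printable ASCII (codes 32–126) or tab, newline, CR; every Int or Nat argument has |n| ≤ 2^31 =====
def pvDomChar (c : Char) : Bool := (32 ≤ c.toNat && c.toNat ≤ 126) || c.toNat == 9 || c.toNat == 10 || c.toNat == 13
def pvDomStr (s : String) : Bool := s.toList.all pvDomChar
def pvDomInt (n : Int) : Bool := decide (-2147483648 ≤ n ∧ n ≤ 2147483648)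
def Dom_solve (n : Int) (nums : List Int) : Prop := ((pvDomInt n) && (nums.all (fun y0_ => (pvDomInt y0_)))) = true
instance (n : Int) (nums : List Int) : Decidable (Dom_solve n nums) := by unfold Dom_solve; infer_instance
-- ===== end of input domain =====

-- B replaces A's sort + five-way case ladder by the closed-form sum of num//2 (simpler).

-- ===== PORT A =====
def solve (_n : Int) (nums : List Int) : Int :=
  (PySem.List.sorted nums (fun x => x) false).foldl
    (fun ans num =>
      if num = 1 then ans
      else if num = 2 then ans + 1
      else if num = 3 then ans + 1
      else if PySem.Int.mod num 2 = 0 then ans + PySem.Int.floordiv num 2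
      else (ans + 1) + PySem.Int.floordiv (num - 3) 2) 0

-- ===== PORT B =====
def solve_alt (_n : Int) (nums : List Int) : Int :=
  (nums.map (fun num => PySem.Int.floordiv num 2)).sum

-- ===== PRECONDITION & SPEC =====
def Spec_solve (n : Int) (nums : List Int) (out : Int) : Prop := out = solve_alt n nums
instance (n : Int) (nums : List Int) (out : Int) : Decidable (Spec_solve n nums out) := by unfold Spec_solve; infer_instance

-- ===== CLAIM (what is proved, stated in full; the proofs are below) =====
def Claim_equal_solve : Prop := ∀ (n : Int) (nums : List Int), Dom_solve n nums → Spec_solve n nums (solve n nums)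

-- ===== LEMMAS AND PROOFS =====

-- Each branch of A's case ladder contributes exactly num // 2.
theorem pv_step_eq (ans num : Int) :
    (if num = 1 then ans
     else if num = 2 then ans + 1
     else if num = 3 then ans + 1
     else if PySem.Int.mod num 2 = 0 then ans + PySem.Int.floordiv num 2
     else (ans + 1) + PySem.Int.floordiv (num - 3) 2)
    = ans + PySem.Int.floordiv num 2 := by
  have h2 : (0:Int) < 2 := by norm_num
  rw [PySem.Int.mod_eq_emod_of_pos h2, PySem.Int.floordiv_eq_ediv_of_pos h2,
      PySem.Int.floordiv_eq_ediv_of_pos h2]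
  split_ifs <;> omega

theorem pv_foldl_eq_sum (l : List Int) (a : Int) :
    l.foldl (fun ans num =>
      if num = 1 then ans
      else if num = 2 then ans + 1
      else if num = 3 then ans + 1
      else if PySem.Int.mod num 2 = 0 then ans + PySem.Int.floordiv num 2
      else (ans + 1) + PySem.Int.floordiv (num - 3) 2) a
    = a + (l.map (fun num => PySem.Int.floordiv num 2)).sum := by
  induction l generalizing a with
  | nil => simp
  | cons x xs ih =>
    rw [List.foldl_cons, pv_step_eq, ih]
    simp only [List.map_cons, List.sum_cons]
    ring

-- ===== VERDICT (by name: the statement is the Claim_ definition above) =====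
theorem solve_spec : Claim_equal_solve := by
  intro n nums _
  unfold Spec_solve solve solve_alt
  rw [pv_foldl_eq_sum, zero_add]
  exact ((PySem.List.sorted_perm nums (fun x => x) false).map
    (fun num => PySem.Int.floordiv num 2)).sum_eq
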